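-- pv_equiv track=rewrite | github.com/hmmwtf/CJG8-Algorithm | practice/boj17140(이차원 배열과 연산).py | r_operation
-- ===== SOURCE A (Python) =====
-- from collections import Counter
--
-- def r_operation(matrix):
--     new_rows = []
--     max_len = 0
--
--     for row in matrix:
--         cnt = Counter(x for x in row if x != 0)
--         pairs = sorted(cnt.items(), key=lambda x: (x[1], x[0]))
--         new_row = []
--         for num, freq in pairs:
--             new_row.extend([num, freq])
--
--         max_len = max(max_len, len(new_row))
--         new_rows.append(new_row)
--
--     max_len = min(max_len, 100)
--     for i in range(len(new_rows)):
--         if len(new_rows[i]) < max_len: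
--             new_rows[i].extend([0] * (max_len - len(new_rows[i])))
--         else:
--             new_rows[i] = new_rows[i][:max_len]
--
--     return new_rows
-- ===== SOURCE B (Python) =====
-- def _rle(vals):
--     # run-length encode a sorted list into (value, count) pairs
--     pairs = []
--     i = 0
--     n = len(vals)
--     while i < n:
--         j = i + 1
--         while j < n and vals[j] == vals[i]:
--             j += 1
--         pairs.append((vals[i], j - i))
--         i = j
--     return pairs
--
--
-- def _compressed(row):
--     pairs = _rle(sorted(x for x in row if x != 0))
--     pairs.sort(key=lambda p: (p[1], p[0]))
--     return [c for p in pairs for c in p]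
--
--
-- def r_operation(matrix):
--     rows = [_compressed(row) for row in matrix]
--     width = min(max(map(len, rows), default=0), 100)
--     return [(r + [0] * width)[:width] for r in rows]
-- ===== Notes on version B (the rewrite author's own statement) =====
-- stated objective: alternative
-- what changed: Per row, B sorts the nonzero values and run-length groups them with an index scan instead of A's Counter hash tally, flattens via a comprehension/flatMap instead of an extend loop, computes the common width once afterwards from max(map(len, rows), default=0), and pads/truncates every row uniformly by append-then-slice instead of A's running max plus branching in-place second pass.
import Mathlib
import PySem

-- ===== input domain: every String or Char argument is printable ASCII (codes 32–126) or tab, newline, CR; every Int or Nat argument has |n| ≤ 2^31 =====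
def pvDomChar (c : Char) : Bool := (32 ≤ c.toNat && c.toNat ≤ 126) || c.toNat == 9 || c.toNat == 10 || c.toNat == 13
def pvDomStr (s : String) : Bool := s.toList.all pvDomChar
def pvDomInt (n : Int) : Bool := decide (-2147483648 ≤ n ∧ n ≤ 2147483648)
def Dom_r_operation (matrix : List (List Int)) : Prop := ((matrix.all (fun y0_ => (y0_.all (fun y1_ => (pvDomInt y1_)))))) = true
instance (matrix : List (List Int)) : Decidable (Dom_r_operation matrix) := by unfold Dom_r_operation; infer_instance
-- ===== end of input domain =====

-- B replaces A's per-row Counter hash tally by sort + index-based run-length grouping (re-sorted by (count, value)),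
-- computes the row width once afterwards and pads/truncates every row uniformly by append-then-slice; alternative decomposition, similar cost.


-- ===== PORT A =====
def r_operation (matrix : List (List Int)) : List (List Int) :=
  -- the first for-loop, state = (new_rows, max_len)
  let st := matrix.foldl (fun s row =>
      let cnt := PySem.Dict.counter (row.filter (fun x => x != 0))
      let pairs := PySem.List.sorted2 cnt.items (fun p => p.2) (fun p => p.1)
      let newRow := pairs.foldl (fun acc p => acc ++ [p.1, p.2]) []
      (s.1 ++ [newRow], max s.2 newRow.length)) (([] : List (List Int)), (0 : Nat))
  let maxLen := min st.2 100
  -- the second for-loop rebuilds each row in place; new_rows[i][:max_len] with 0 ≤ max_len is List.take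
  st.1.map (fun r => if r.length < maxLen then r ++ List.replicate (maxLen - r.length) 0 else r.take maxLen)

-- ===== PORT B =====
-- the index while-loop of _rle: inner 'while vals[j] == vals[i]' counted as takeWhile on the suffix
def pvRleAux (vals : List Int) (i : Nat) : List (Int × Int) :=
  if h : i < vals.length then
    let j := i + 1 + ((vals.drop (i + 1)).takeWhile (fun x => x == vals[i])).length
    (vals[i], ((j : Int) - (i : Int))) :: pvRleAux vals j
  else []
termination_by vals.length - i
decreasing_by omega

def pvCompressed (row : List Int) : List Int :=
  let pairs := PySem.List.sorted2
      (pvRleAux (PySem.List.sorted (row.filter (fun x => x != 0)) (fun x => x)) 0)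
      (fun p => p.2) (fun p => p.1)
  pairs.flatMap (fun p => [p.1, p.2])

def r_operation_alt (matrix : List (List Int)) : List (List Int) :=
  let rows := matrix.map pvCompressed
  let width := min ((rows.map (fun r => r.length)).foldl max 0) 100
  rows.map (fun r => (r ++ List.replicate width 0).take width)

-- ===== PRECONDITION & SPEC =====
def Spec_r_operation (matrix : List (List Int)) (out : List (List Int)) : Prop := out = r_operation_alt matrix
instance (matrix : List (List Int)) (out : List (List Int)) : Decidable (Spec_r_operation matrix out) := by unfold Spec_r_operation; infer_instance

-- ===== CLAIM (what is proved, stated in full; the proofs are below) =====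
def Claim_equal_r_operation : Prop := ∀ (matrix : List (List Int)), Dom_r_operation matrix → Spec_r_operation matrix (r_operation matrix)

-- ===== LEMMAS AND PROOFS =====

-- proof-side recursive run-length encoder, same values as pvRleAux on the dropped suffix
def pvRleRec : List Int → List (Int × Int)
  | [] => []
  | v :: t =>
    (v, (1 : Int) + (t.takeWhile (fun x => x == v)).length) :: pvRleRec (t.dropWhile (fun x => x == v))
termination_by l => l.length
decreasing_by simpa using Nat.lt_succ_of_le (List.length_dropWhile_le _ _)

lemma drop_takeWhile_length (t : List Int) (p : Int → Bool) :
    t.drop (t.takeWhile p).length = t.dropWhile p := by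
  have h1 : (t.takeWhile p ++ t.dropWhile p).drop (t.takeWhile p).length = t.dropWhile p :=
    List.drop_left
  rwa [List.takeWhile_append_dropWhile] at h1

lemma pvRleAux_eq_rec (vals : List Int) (i : Nat) : pvRleAux vals i = pvRleRec (vals.drop i) := by
  fun_induction pvRleAux vals i with
  | case1 i h j ih =>
    have hd : vals.drop i = vals[i] :: vals.drop (i + 1) := List.drop_eq_getElem_cons h
    have hdrop : vals.drop j = (vals.drop (i + 1)).dropWhile (fun x => x == vals[i]) := by
      have hj : j = (i + 1) + ((vals.drop (i + 1)).takeWhile (fun x => x == vals[i])).length := rfl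
      rw [hj, ← List.drop_drop, drop_takeWhile_length]
    rw [ih, hd, pvRleRec, hdrop]
    congr 1
    simp only [Prod.mk.injEq, true_and]
    omega
  | case2 i h =>
    rw [List.drop_eq_nil_of_le (by omega)]
    simp [pvRleRec]

lemma foldl_setAdd_cons (v : Int) : ∀ (ys : List Int) (s : List Int), v ∉ ys →
    ys.foldl PySem.Set.add (v :: s) = v :: ys.foldl PySem.Set.add s := by
  intro ys
  induction ys with
  | nil => intro s _; rfl
  | cons y t ih =>
    intro s hv
    have hyv : ¬ (y = v) := by intro h; exact hv (h ▸ List.mem_cons_self)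
    have hstep : PySem.Set.add (v :: s) y = v :: PySem.Set.add s y := by
      by_cases hm : y ∈ s
      · simp [PySem.Set.add, PySem.Set.contains, hyv, hm]
      · simp [PySem.Set.add, PySem.Set.contains, hyv, hm]
    rw [List.foldl_cons, List.foldl_cons, hstep, ih _ (fun h => hv (List.mem_cons_of_mem _ h))]

lemma foldl_setAdd_run (v : Int) : ∀ (run : List Int), (∀ x ∈ run, x = v) →
    run.foldl PySem.Set.add [v] = [v] := by
  intro run
  induction run with
  | nil => intro _; rfl
  | cons y t ih =>
    intro hrun
    have hy : y = v := hrun y List.mem_cons_self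
    have : PySem.Set.add [v] y = [v] := by
      simp [PySem.Set.add, PySem.Set.contains, hy]
    rw [List.foldl_cons, this, ih (fun x hx => hrun x (List.mem_cons_of_mem _ hx))]

lemma pvRleRec_sorted_eq (l : List Int) (h : l.Pairwise (· ≤ ·)) :
    pvRleRec l = (PySem.List.dedup l).map (fun k => (k, (l.count k : Int))) := by
  fun_induction pvRleRec l with
  | case1 => rfl
  | case2 v t ih =>
    rw [List.pairwise_cons] at h
    obtain ⟨hv, ht⟩ := h
    set run := t.takeWhile (fun x => x == v) with hrun_def
    set rest := t.dropWhile (fun x => x == v) with hrest_def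
    have hsplit : run ++ rest = t := List.takeWhile_append_dropWhile
    have hrun : ∀ x ∈ run, x = v := by
      intro x hx
      have := List.mem_takeWhile_imp hx
      simpa using this
    have hrest_sub : rest.Sublist t := List.dropWhile_sublist _
    have hrest_pw : rest.Pairwise (· ≤ ·) := ht.sublist hrest_sub
    have hvrest : v ∉ rest := by
      intro hmem
      cases hr : rest with
      | nil => rw [hr] at hmem; simp at hmem
      | cons y ys =>
        have hy_not : ¬ (y == v) = true := by
          have := List.head?_dropWhile_not (fun x => x == v) t
          rw [← hrest_def, hr] at this
          simpa using this
        have hyv : y ≠ v := by simpa using hy_not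
        have hvy : v < y := lt_of_le_of_ne (hv y (hrest_sub.mem (hr ▸ List.mem_cons_self))) (Ne.symm hyv)
        rw [hr] at hmem
        rcases List.mem_cons.mp hmem with h1 | h1
        · exact hyv h1.symm
        · have : y ≤ v := by
            rw [hr] at hrest_pw
            exact (List.pairwise_cons.mp hrest_pw).1 v h1
          omega
    have hcount_run : run.count v = run.length :=
      List.count_eq_length.mpr (fun b hb => (hrun b hb).symm)
    have hcount_v : (v :: t).count v = run.length + 1 := by
      rw [List.count_cons_self, ← hsplit, List.count_append,
        List.count_eq_zero.mpr hvrest, hcount_run]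
    have hdedup : PySem.List.dedup (v :: t) = v :: PySem.List.dedup rest := by
      rw [PySem.List.dedup_eq_ofList, PySem.List.dedup_eq_ofList, PySem.Set.ofList_eq_foldl,
        PySem.Set.ofList_eq_foldl]
      rw [← hsplit]
      have h0 : PySem.Set.add [] v = [v] := rfl
      rw [List.foldl_cons, h0, List.foldl_append, foldl_setAdd_run v run hrun,
        foldl_setAdd_cons v rest [] hvrest]
    rw [hdedup, List.map_cons, ih hrest_pw]
    congr 1
    · simp only [Prod.mk.injEq, true_and]
      rw [hcount_v]
      push_cast
      ring
    · apply List.map_congr_left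
      intro k hk
      have hk_rest : k ∈ rest := by
        rw [PySem.List.dedup_eq_ofList] at hk
        exact (PySem.Set.mem_ofList _ _).mp hk
      have hkv : k ≠ v := fun h => hvrest (h ▸ hk_rest)
      have hcount : (v :: t).count k = rest.count k := by
        rw [List.count_cons_of_ne hkv.symm, ← hsplit, List.count_append,
          List.count_eq_zero.mpr (fun hkr => hkv (hrun k hkr))]
        omega
      rw [hcount]

lemma sorted2_eq_sorted_lex (xs : List (Int × Int)) :
    PySem.List.sorted2 xs (fun p => p.2) (fun p => p.1) false
      = PySem.List.sorted xs (fun p => toLex (p.2, p.1)) false := by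
  rw [PySem.List.sorted_eq_foldl_insertBy]
  simp only [PySem.List.sorted2]
  congr 1
  funext acc x
  congr 1
  funext a b
  have hlex : (toLex (a.2, a.1) < toLex (b.2, b.1)) ↔ (a.2 < b.2 ∨ (a.2 = b.2 ∧ a.1 < b.1)) := by
    rw [Prod.Lex.lt_iff]; rfl
  by_cases h1 : a.2 < b.2 <;> by_cases h2 : b.2 < a.2 <;> by_cases h3 : a.1 < b.1 <;>
    simp [hlex, h1, h2, h3] <;> omega

lemma pairs_perm (xs : List Int) :
    (pvRleAux (PySem.List.sorted xs (fun x => x) false) 0).Perm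
      (PySem.Dict.counter xs).items := by
  rw [pvRleAux_eq_rec, List.drop_zero]
  set s := PySem.List.sorted xs (fun x => x) false with hs
  have hpw : s.Pairwise (· ≤ ·) := PySem.List.sorted_pairwise xs (fun x => x)
  rw [pvRleRec_sorted_eq s hpw, PySem.Dict.items_counter]
  have hperm : s.Perm xs := PySem.List.sorted_perm xs (fun x => x) false
  have hcongr : (PySem.List.dedup s).map (fun k => (k, (s.count k : Int)))
      = (PySem.List.dedup s).map (fun k => (k, (xs.count k : Int))) := by
    apply List.map_congr_left
    intro k _
    rw [hperm.count_eq]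
  rw [hcongr]
  apply List.Perm.map
  rw [PySem.List.dedup_eq_ofList]
  apply (List.perm_ext_iff_of_nodup (PySem.Set.nodup_ofList _) (PySem.Set.nodup_ofList _)).mpr
  intro a
  rw [PySem.Set.mem_ofList, PySem.Set.mem_ofList, PySem.List.mem_sorted]

lemma row_eq (row : List Int) :
    (PySem.List.sorted2 (PySem.Dict.counter (row.filter (fun x => x != 0))).items
        (fun p => p.2) (fun p => p.1)).foldl (fun acc p => acc ++ [p.1, p.2]) []
      = pvCompressed row := by
  rw [pvCompressed]
  have hflat : ∀ L : List (Int × Int), List.foldl (fun acc p => acc ++ [p.1, p.2]) [] L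
      = L.flatMap (fun p => [p.1, p.2]) := fun L => by
    simpa using PySem.List.foldl_append_eq_flatMap (g := fun p : Int × Int => [p.1, p.2]) (l := L) (acc := [])
  rw [hflat]
  congr 1
  rw [sorted2_eq_sorted_lex, sorted2_eq_sorted_lex]
  apply PySem.List.sorted_eq_sorted_of_perm
  · intro p q hpq
    have := toLex.injective hpq
    simp only [Prod.mk.injEq] at this
    exact Prod.ext this.2 this.1
  · exact (pairs_perm _).symm

lemma pad_eq (w : Nat) (r : List Int) :
    (if r.length < w then r ++ List.replicate (w - r.length) 0 else r.take w)
      = (r ++ List.replicate w 0).take w := by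
  rw [List.take_append, List.take_replicate]
  by_cases h : r.length < w
  · rw [if_pos h, List.take_of_length_le (by omega), Nat.min_eq_left (Nat.sub_le _ _)]
  · rw [if_neg h]
    have : w - r.length = 0 := by omega
    rw [this]
    simp


-- ===== VERDICT (by name: the statement is the Claim_ definition above) =====
theorem r_operation_spec : Claim_equal_r_operation := by
  intro matrix _
  simp only [Spec_r_operation, r_operation, r_operation_alt]
  rw [PySem.List.foldl_prod_mk
    (f := fun (acc : List (List Int)) (row : List Int) => acc ++ [(PySem.List.sorted2
        (PySem.Dict.counter (row.filter (fun x => x != 0))).items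
        (fun p => p.2) (fun p => p.1)).foldl (fun acc p => acc ++ [p.1, p.2]) []])
    (g := fun (m : Nat) (row : List Int) => max m ((PySem.List.sorted2
        (PySem.Dict.counter (row.filter (fun x => x != 0))).items
        (fun p => p.2) (fun p => p.1)).foldl (fun acc p => acc ++ [p.1, p.2]) []).length)]
  simp only [List.foldl_map]
  have hrows : matrix.foldl (fun acc row => acc ++ [(PySem.List.sorted2
      (PySem.Dict.counter (row.filter (fun x => x != 0))).items
      (fun p => p.2) (fun p => p.1)).foldl (fun acc p => acc ++ [p.1, p.2]) []]) []
      = matrix.map pvCompressed := by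
    rw [PySem.List.foldl_append_singleton_eq_map]
    rw [List.nil_append]
    exact List.map_congr_left (fun row _ => row_eq row)
  have hmax : matrix.foldl (fun m row => max m ((PySem.List.sorted2
      (PySem.Dict.counter (row.filter (fun x => x != 0))).items
      (fun p => p.2) (fun p => p.1)).foldl (fun acc p => acc ++ [p.1, p.2]) []).length) 0
      = matrix.foldl (fun m row => max m (pvCompressed row).length) 0 := by
    apply PySem.List.foldl_congr_mem
    intro acc row _
    rw [row_eq row]
  rw [hrows, hmax]
  apply List.map_congr_left
  intro r _
  exact pad_eq _ r
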